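-- pv_equiv track=rewrite | github.com/olehermanse/dotfiles | bin/gai.py | parse_commit_body
-- ===== SOURCE A (Python) =====
-- def parse_commit_body(rest):
--     """Parse the commit body to separate body and footer."""
--     if not rest:
--         return "", ""
--
--     # Split into segments separated by empty lines
--     segments = []
--     current_segment = []
--
--     for line in rest.split("\n"):
--         if line.strip() == "":
--             # Empty line
--             if current_segment:
--                 segments.append("\n".join(current_segment))
--                 current_segment = []
--         else:
--             # Non-empty line
--             current_segment.append(line)
--
--     # Add the last segment if any
--     if current_segment:
--         segments.append("\n".join(current_segment))
--
--     body = ""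
--     footer = ""
--
--     if len(segments) >= 2:
--         # 2+ segments: last is footer, rest is body
--         body = "\n\n".join(segments[:-1])
--         footer = segments[-1]
--     elif len(segments) == 1:
--         # 1 segment: check for "Signed-off-by"
--         if "Signed-off-by" in segments[0]:
--             footer = segments[0]
--         else:
--             body = segments[0]
--
--     return body, footer
-- ===== SOURCE B (Python) =====
-- def _segments(lines):
--     """Recursively group maximal runs of non-blank lines into paragraphs."""
--     if not lines:
--         return []
--     if lines[0].strip() == "":
--         return _segments(lines[1:])
--     k = 1
--     while k < len(lines) and lines[k].strip() != "":
--         k += 1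
--     return ["\n".join(lines[:k])] + _segments(lines[k:])
--
--
-- def parse_commit_body(rest):
--     """Parse the commit body to separate body and footer."""
--     if not rest:
--         return "", ""
--     segments = _segments(rest.split("\n"))
--     if not segments:
--         return "", ""
--     *init, last = segments
--     if init:
--         return "\n\n".join(init), last
--     return ("", last) if "Signed-off-by" in last else (last, "")
-- ===== Notes on version B (the rewrite author's own statement) =====
-- stated objective: simpler
-- what changed: Replaced the accumulate-and-flush segment state machine by a recursive helper that groups each maximal run of non-blank lines in one step, and replaced the length-based dispatch by unpacking the segment list into init/last.
import Mathlib
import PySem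

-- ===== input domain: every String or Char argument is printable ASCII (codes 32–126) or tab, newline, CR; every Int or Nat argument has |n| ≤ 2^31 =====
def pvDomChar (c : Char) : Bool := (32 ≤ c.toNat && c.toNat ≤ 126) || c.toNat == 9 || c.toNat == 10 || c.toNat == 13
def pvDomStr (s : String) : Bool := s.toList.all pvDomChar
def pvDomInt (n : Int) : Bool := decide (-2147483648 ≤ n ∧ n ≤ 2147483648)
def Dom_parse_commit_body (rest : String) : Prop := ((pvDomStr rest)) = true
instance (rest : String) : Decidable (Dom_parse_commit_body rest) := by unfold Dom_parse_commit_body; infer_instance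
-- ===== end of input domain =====

-- B replaces A's accumulate-and-flush state machine by a recursive run-grouping helper
-- and unpacks the segment list into init/last instead of length tests (objective: simpler).

-- ===== PORT A =====

-- rest.split("\n"): sep is the nonempty literal "\n", so split? always returns some
def pcbLines (rest : String) : List String := (PySem.Str.split? rest "\n").getD []

-- one step of A's for-loop: state = (segments, current_segment)
def pcbStep (st : List String × List String) (line : String) : List String × List String :=
  if PySem.Str.strip line == "" then
    if st.2 ≠ [] then (st.1 ++ [PySem.Str.join "\n" st.2], []) else st
  else (st.1, st.2 ++ [line])

def parse_commit_body (rest : String) : String × String :=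
  if rest == "" then ("", "")
  else
    let st := (pcbLines rest).foldl pcbStep ([], [])
    let segments := if st.2 ≠ [] then st.1 ++ [PySem.Str.join "\n" st.2] else st.1
    if segments.length ≥ 2 then
      (PySem.Str.join "\n\n" (PySem.List.slice segments none (some (-1))),
       (PySem.List.pyGet? segments (-1)).getD "")
    else if segments.length == 1 then
      let s := (PySem.List.pyGet? segments 0).getD ""
      if PySem.Str.isIn "Signed-off-by" s then ("", s) else (s, "")
    else ("", "")

-- ===== PORT B =====

def pcbBlank (l : String) : Bool := PySem.Str.strip l == ""

-- B's _segments: group each maximal run of non-blank lines (the while loop over k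
-- computes exactly the longest non-blank prefix, i.e. takeWhile/dropWhile)
def pcbSegs : List String → List String
  | [] => []
  | l :: ls =>
    if pcbBlank l then pcbSegs ls
    else PySem.Str.join "\n" (l :: ls.takeWhile (fun x => !pcbBlank x)) ::
         pcbSegs (ls.dropWhile (fun x => !pcbBlank x))
termination_by ls => ls.length
decreasing_by
  · simp
  · have := List.length_dropWhile_le (p := fun x => !pcbBlank x) (l := ls)
    simp; omega

def parse_commit_body_alt (rest : String) : String × String :=
  if rest == "" then ("", "")
  else
    match pcbSegs (pcbLines rest) with
    | [] => ("", "")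
    | s :: ss =>
      let last := (s :: ss).getLast (by simp)
      let init := (s :: ss).dropLast
      if init ≠ [] then (PySem.Str.join "\n\n" init, last)
      else if PySem.Str.isIn "Signed-off-by" last then ("", last) else (last, "")

-- ===== PRECONDITION & SPEC =====
def Spec_parse_commit_body (rest : String) (out : String × String) : Prop := out = parse_commit_body_alt rest
instance (rest : String) (out : String × String) : Decidable (Spec_parse_commit_body rest out) := by unfold Spec_parse_commit_body; infer_instance

-- ===== CLAIM (what is proved, stated in full; the proofs are below) =====
def Claim_equal_parse_commit_body : Prop := ∀ (rest : String), Dom_parse_commit_body rest → Spec_parse_commit_body rest (parse_commit_body rest)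

-- ===== LEMMAS AND PROOFS =====

-- the pending run 'cur' of A's loop, merged with the rest of the lines, seen through B's eyes
def pcbG (cur : List String) (lines : List String) : List String :=
  if cur = [] then pcbSegs lines
  else PySem.Str.join "\n" (cur ++ lines.takeWhile (fun x => !pcbBlank x)) ::
       pcbSegs (lines.dropWhile (fun x => !pcbBlank x))

def pcbFin (st : List String × List String) : List String :=
  if st.2 ≠ [] then st.1 ++ [PySem.Str.join "\n" st.2] else st.1

theorem pcb_fold_eq (lines : List String) : ∀ (segs cur : List String),
    pcbFin (lines.foldl pcbStep (segs, cur)) = segs ++ pcbG cur lines := by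
  induction lines with
  | nil =>
    intro segs cur
    by_cases h : cur = [] <;> simp [pcbFin, pcbG, pcbSegs, h]
  | cons l ls ih =>
    intro segs cur
    by_cases hb : pcbBlank l
    · by_cases hc : cur = []
      · subst hc
        simp [pcbStep, pcbBlank] at hb ⊢
        rw [if_pos hb]
        simp [ih segs [], pcbG, pcbSegs, hb, pcbBlank]
      · simp only [List.foldl_cons, pcbStep]
        rw [if_pos (by simpa [pcbBlank] using hb), if_pos (by simpa using hc)]
        rw [ih (segs ++ [PySem.Str.join "\n" cur]) []]
        simp [pcbG, hc, hb, pcbSegs]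
    · simp only [List.foldl_cons, pcbStep]
      rw [if_neg (by simpa [pcbBlank] using hb)]
      rw [ih segs (cur ++ [l])]
      by_cases hc : cur = [] <;>
        simp [pcbG, hc, pcbSegs, hb]

theorem pcb_segs_eq (lines : List String) :
    pcbFin (lines.foldl pcbStep ([], [])) = pcbSegs lines := by
  rw [pcb_fold_eq lines [] []]; simp [pcbG]

-- ===== VERDICT (by name: the statement is the Claim_ definition above) =====
theorem parse_commit_body_spec : Claim_equal_parse_commit_body := by
  intro rest _
  unfold Spec_parse_commit_body parse_commit_body parse_commit_body_alt
  by_cases h0 : rest == ""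
  · simp [h0]
  · simp only [h0, Bool.false_eq_true, if_false]
    have hseg := pcb_segs_eq (pcbLines rest)
    simp only [pcbFin] at hseg
    rw [hseg]
    cases hs : pcbSegs (pcbLines rest) with
    | nil => simp
    | cons s ss =>
      cases ss with
      | nil =>
        simp only [List.length_cons, List.length_nil, ge_iff_le, show ¬(2 ≤ 1) by omega,
          if_false, beq_self_eq_true, if_pos,
          show PySem.List.pyGet? [s] (0 : Int) = some s from rfl, Option.getD_some]
        simp
      | cons t ts =>
        have hlen : (s :: t :: ts).length ≥ 2 := by simp
        rw [if_pos hlen]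
        have hlast : (PySem.List.pyGet? (s :: t :: ts) (-1)).getD ""
            = (s :: t :: ts).getLast (by simp) := by
          rw [PySem.List.pyGet?_neg_one]
          simp [List.getLast?_eq_some_getLast]
        rw [PySem.List.slice_to_neg_one, hlast]
        simp
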